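-- pv_equiv track=rewrite | github.com/Debraj-Das/DSA | name.py | modified
-- ===== SOURCE A (Python) =====
-- def modified(s, exe):
--     for c in s:
--         if not c.isalnum():
--             s = s.replace(c, " ")
--     s = s[0].upper() + s[1:]
--     big = False
--     name = ""
--     for c in s:
--         if c == " ":
--             big = True
--         elif big:
--             name += c.upper()
--             big = False
--         else:
--             name += c
--
--     return name + "." + exe
-- ===== SOURCE B (Python) =====
-- def modified(s, exe):
--     # Collect maximal runs of alphanumeric characters in one pass; any
--     # non-alnum character ends the current run.  Capitalize each run's
--     # first character and concatenate.
--     words = []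
--     cur = ""
--     for c in s:
--         if c.isalnum():
--             cur += c
--         elif cur:
--             words.append(cur)
--             cur = ""
--     if cur:
--         words.append(cur)
--     return "".join(w[0].upper() + w[1:] for w in words) + "." + exe
-- ===== Notes on version B (the rewrite author's own statement) =====
-- stated objective: alternative
-- what changed: A rewrites the whole string with s.replace once per non-alnum character and then runs a flag-driven second pass; B makes a single pass collecting maximal alnum runs and capitalizes each run's head.
import Mathlib
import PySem

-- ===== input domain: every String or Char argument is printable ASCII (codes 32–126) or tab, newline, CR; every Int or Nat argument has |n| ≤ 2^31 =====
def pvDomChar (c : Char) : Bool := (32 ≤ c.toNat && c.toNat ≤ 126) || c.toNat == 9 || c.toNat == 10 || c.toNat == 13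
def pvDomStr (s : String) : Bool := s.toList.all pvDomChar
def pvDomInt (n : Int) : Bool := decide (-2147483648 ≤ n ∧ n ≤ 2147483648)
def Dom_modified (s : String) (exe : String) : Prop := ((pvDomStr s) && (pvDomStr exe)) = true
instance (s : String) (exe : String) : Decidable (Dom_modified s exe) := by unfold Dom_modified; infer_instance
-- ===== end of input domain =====

-- B replaces A's repeated whole-string rewriting (one s.replace per non-alnum
-- character, then a flag-driven second pass) by a single pass that collects
-- maximal alnum runs and capitalizes each run's head.

-- ===== PORT A =====

-- state step of A's second loop: (big, name)
def stepA (st : Bool × List Char) (c : Char) : Bool × List Char :=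
  if c = ' ' then (true, st.2)
  else if st.1 then (false, st.2 ++ [PySem.Chars.upperChar c])
  else (st.1, st.2 ++ [c])

def modified (s : String) (exe : String) : String :=
  -- for c in s: if not c.isalnum(): s = s.replace(c, " ")
  -- (the loop iterates over the ORIGINAL string while s is rebound)
  let s1 : List Char :=
    s.toList.foldl
      (fun a c => if PySem.Chars.isalnum c then a else PySem.Chars.replace a [c] [' '])
      s.toList
  match s1 with
  | [] => ""          -- s[0] raises IndexError in Python; excluded by Pre_modified
  | c0 :: t =>
    -- s = s[0].upper() + s[1:]
    let s2 := PySem.Chars.upperChar c0 :: t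
    let r := s2.foldl stepA (false, [])
    String.ofList (r.2 ++ '.' :: exe.toList)

-- ===== PORT B =====

-- state step of B's single pass: (words, cur)
def stepB (p : List (List Char) × List Char) (c : Char) : List (List Char) × List Char :=
  if PySem.Chars.isalnum c then (p.1, p.2 ++ [c])
  else if p.2 ≠ [] then (p.1 ++ [p.2], [])
  else (p.1, [])

-- w[0].upper() + w[1:]  (B's words are never empty)
def capWord (w : List Char) : List Char :=
  match w with
  | [] => []
  | h :: t => PySem.Chars.upperChar h :: t

def modified_alt (s : String) (exe : String) : String :=
  let st := s.toList.foldl stepB ([], [])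
  let words := if st.2 ≠ [] then st.1 ++ [st.2] else st.1
  String.ofList ((words.map capWord).flatten ++ '.' :: exe.toList)

-- ===== PRECONDITION & SPEC =====
-- Pre_ excludes only the empty string s, on which A raises IndexError at s[0].
def Pre_modified (s : String) (exe : String) : Prop := s ≠ ""
instance (s : String) (exe : String) : Decidable (Pre_modified s exe) := by
  unfold Pre_modified; infer_instance

def pvWitness_modified : String × String := ("my cool file", "txt")

def Spec_modified (s : String) (exe : String) (out : String) : Prop := out = modified_alt s exe
instance (s : String) (exe : String) (out : String) : Decidable (Spec_modified s exe out) := by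
  unfold Spec_modified; infer_instance

-- ===== CLAIM (what is proved, stated in full; the proofs are below) =====
def Claim_equal_modified : Prop := ∀ (s : String) (exe : String), Dom_modified s exe → Pre_modified s exe → Spec_modified s exe (modified s exe)

-- ===== LEMMAS AND PROOFS =====

-- the substitution A's first loop performs on every character
def sub (c : Char) : Char := if PySem.Chars.isalnum c then c else ' '

def flatCaps (ws : List (List Char)) : List Char := (ws.map capWord).flatten

lemma replace_go_single (c : Char) :
    ∀ (fuel : Nat) (l acc : List Char), l.length ≤ fuel →
      PySem.Chars.replace.go [c] [' '] fuel l acc =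
        acc.reverse ++ l.map (fun x => if x = c then ' ' else x) := by
  intro fuel
  induction fuel with
  | zero =>
    intro l acc h
    have : l = [] := List.eq_nil_of_length_eq_zero (Nat.le_zero.mp h)
    subst this
    simp [PySem.Chars.replace.go]
  | succ n ih =>
    intro l acc h
    cases l with
    | nil => simp [PySem.Chars.replace.go]
    | cons x t =>
      by_cases hx : x = c
      · subst hx
        have hpre : [x].isPrefixOf (x :: t) = true := by
          simp [List.isPrefixOf]
        rw [PySem.Chars.replace.go, if_pos hpre]
        have hd : List.drop [x].length (x :: t) = t := by simp
        simp only [List.length_cons] at h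
        rw [hd, ih t _ (by omega)]
        simp
      · have hpre : [c].isPrefixOf (x :: t) = false := by
          simp [List.isPrefixOf]
          exact fun hc => absurd hc.symm hx
        rw [PySem.Chars.replace.go, if_neg (by simp [hpre])]
        simp only [List.length_cons] at h
        rw [ih _ _ (by omega)]
        simp [hx]

lemma replace_single (c : Char) (l : List Char) :
    PySem.Chars.replace l [c] [' '] = l.map (fun x => if x = c then ' ' else x) := by
  rw [PySem.Chars.replace, if_neg (by simp)]
  exact replace_go_single c l.length l [] le_rfl

-- A's first loop rewrites the string to (map sub)
lemma loop1_inv (cs : List Char) :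
    ∀ (rest : List Char) (g : Char → Char), (∀ x, g x = x ∨ g x = ' ') →
      rest.foldl
        (fun a c => if PySem.Chars.isalnum c then a else PySem.Chars.replace a [c] [' '])
        (cs.map g)
      = cs.map (fun x => if ¬ PySem.Chars.isalnum x ∧ x ∈ rest then ' ' else g x) := by
  intro rest
  induction rest with
  | nil => intro g hg; simp
  | cons c r ih =>
    intro g hg
    by_cases hc : PySem.Chars.isalnum c
    · simp only [List.foldl_cons, if_pos hc]
      rw [ih g hg]
      apply List.map_congr_left
      intro x _
      by_cases hx : PySem.Chars.isalnum x
      · simp [hx]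
      · have : x ≠ c := fun h => hx (h ▸ hc)
        simp [hx, this]
    · simp only [List.foldl_cons, if_neg hc]
      rw [replace_single, List.map_map]
      rw [ih _ (by
        intro x
        by_cases hxc : (fun y => if y = c then ' ' else y) (g x) = ' '
        · exact Or.inr hxc
        · simp only [Function.comp_apply]
          rcases hg x with h | h
          · rw [h]; by_cases hc2 : x = c <;> simp [hc2]
          · rw [h]; by_cases hc2 : ' ' = c <;> simp [hc2])]
      apply List.map_congr_left
      intro x _
      have hsp : PySem.Chars.isalnum ' ' = false := by decide
      rcases hg x with h | h <;>
        simp only [Function.comp_apply, h, List.mem_cons] <;>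
        by_cases hx : PySem.Chars.isalnum x <;>
        by_cases hxr : x ∈ r <;>
        by_cases hxc : x = c <;>
        simp_all <;>
        split_ifs <;> simp_all

lemma loop1_eq (cs : List Char) :
    cs.foldl
      (fun a c => if PySem.Chars.isalnum c then a else PySem.Chars.replace a [c] [' '])
      cs = cs.map sub := by
  have := loop1_inv cs cs id (fun x => Or.inl rfl)
  simpa only [List.map_id] using this.trans (by
    apply List.map_congr_left
    intro x hx
    by_cases h : PySem.Chars.isalnum x <;> simp [sub, h, hx])

lemma isalnum_ne_space {c : Char} (h : PySem.Chars.isalnum c = true) : c ≠ ' ' := by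
  intro he; subst he; exact absurd h (by decide)

lemma upperChar_ne_space {c : Char} (h : PySem.Chars.isalnum c = true) :
    PySem.Chars.upperChar c ≠ ' ' := by
  unfold PySem.Chars.upperChar
  split_ifs with hl
  · simp only [PySem.Chars.islower, Bool.and_eq_true, decide_eq_true_eq] at hl
    intro he
    have hb : 97 ≤ c.toNat ∧ c.toNat ≤ 122 := by
      constructor <;> [exact hl.1; exact hl.2]
    have h1 : (Char.ofNat (c.toNat - 32)).toNat = c.toNat - 32 := by
      rw [Char.toNat_ofNat, if_pos (Or.inl (by omega))]
    rw [he] at h1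
    have h3 : (' ' : Char).toNat = 32 := by decide
    omega
  · exact isalnum_ne_space h

lemma capWord_append (w : List Char) (c : Char) (h : w ≠ []) :
    capWord (w ++ [c]) = capWord w ++ [c] := by
  cases w with
  | nil => exact absurd rfl h
  | cons a t => simp [capWord]

lemma flatCaps_append (ws : List (List Char)) (w : List Char) :
    flatCaps (ws ++ [w]) = flatCaps ws ++ capWord w := by
  simp [flatCaps]

-- the joint invariant tying A's second loop to B's run collection
lemma key_inv :
    ∀ (rest : List Char),
      (∀ (words : List (List Char)) (cur : List Char), cur ≠ [] →
        ((rest.map sub).foldl stepA (false, flatCaps words ++ capWord cur)).2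
          = flatCaps (let st := rest.foldl stepB (words, cur);
                      if st.2 ≠ [] then st.1 ++ [st.2] else st.1)) ∧
      (∀ (words : List (List Char)),
        ((rest.map sub).foldl stepA (true, flatCaps words)).2
          = flatCaps (let st := rest.foldl stepB (words, []);
                      if st.2 ≠ [] then st.1 ++ [st.2] else st.1)) := by
  intro rest
  induction rest with
  | nil =>
    constructor
    · intro words cur hcur
      simp [hcur, flatCaps_append]
    · intro words
      simp
  | cons c r ih =>
    constructor
    · intro words cur hcur
      by_cases hc : PySem.Chars.isalnum c
      · have hs : sub c = c := by simp [sub, hc]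
        have hne : c ≠ ' ' := isalnum_ne_space hc
        simp only [List.map_cons, List.foldl_cons, hs]
        rw [show stepA (false, flatCaps words ++ capWord cur) c
              = (false, flatCaps words ++ capWord cur ++ [c]) by
            simp [stepA, hne]]
        rw [show stepB (words, cur) c = (words, cur ++ [c]) by simp [stepB, hc]]
        have h2 := ih.1 words (cur ++ [c]) (by simp)
        rw [capWord_append cur c hcur, ← List.append_assoc] at h2
        exact h2
      · have hs : sub c = ' ' := by simp [sub, hc]
        simp only [List.map_cons, List.foldl_cons, hs]
        rw [show stepA (false, flatCaps words ++ capWord cur) ' '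
              = (true, flatCaps words ++ capWord cur) by simp [stepA]]
        rw [show stepB (words, cur) c = (words ++ [cur], []) by simp [stepB, hc, hcur]]
        rw [← flatCaps_append]
        exact ih.2 (words ++ [cur])
    · intro words
      by_cases hc : PySem.Chars.isalnum c
      · have hs : sub c = c := by simp [sub, hc]
        have hne : c ≠ ' ' := isalnum_ne_space hc
        simp only [List.map_cons, List.foldl_cons, hs]
        rw [show stepA (true, flatCaps words) c
              = (false, flatCaps words ++ [PySem.Chars.upperChar c]) by
            simp [stepA, hne]]
        rw [show stepB (words, ([] : List Char)) c = (words, [c]) by simp [stepB, hc]]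
        have := ih.1 words [c] (by simp)
        simpa [capWord] using this
      · have hs : sub c = ' ' := by simp [sub, hc]
        simp only [List.map_cons, List.foldl_cons, hs]
        rw [show stepA (true, flatCaps words) ' ' = (true, flatCaps words) by simp [stepA]]
        rw [show stepB (words, ([] : List Char)) c = (words, []) by simp [stepB, hc]]
        exact ih.2 words

-- ===== VERDICT (by name: the statement is the Claim_ definition above) =====
theorem modified_spec : Claim_equal_modified := by
  intro s exe _ hpre
  unfold Spec_modified modified modified_alt
  simp only []
  rw [loop1_eq]
  have hcs : s.toList ≠ [] := by
    intro h
    exact hpre (by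
      have := congrArg String.ofList h
      simpa using this)
  cases hs : s.toList with
  | nil => exact absurd hs hcs
  | cons c0 rest =>
    simp only [List.map_cons, List.foldl_cons]
    by_cases hc : PySem.Chars.isalnum c0
    · have hs0 : sub c0 = c0 := by simp [sub, hc]
      rw [hs0]
      rw [show stepA (false, []) (PySem.Chars.upperChar c0)
            = (false, [PySem.Chars.upperChar c0]) by
          simp [stepA, upperChar_ne_space hc]]
      rw [show stepB ([], []) c0 = ([], [c0]) by simp [stepB, hc]]
      have := (key_inv rest).1 [] [c0] (by simp)
      simp only [flatCaps, List.map_nil, List.flatten_nil, List.nil_append, capWord] at this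
      rw [this]
    · have hs0 : sub c0 = ' ' := by simp [sub, hc]
      rw [hs0]
      rw [show PySem.Chars.upperChar ' ' = ' ' by decide]
      rw [show stepA (false, []) ' ' = (true, []) by simp [stepA]]
      rw [show stepB ([], []) c0 = ([], []) by simp [stepB, hc]]
      have := (key_inv rest).2 []
      simp only [flatCaps, List.map_nil, List.flatten_nil] at this
      rw [this]
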